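-- pv_equiv track=rewrite | github.com/nbrandelHodayot/SVapp | SVapp/tools/parse_digit_pdf.py | parse_digit_coords
-- ===== SOURCE A (Python) =====
-- def parse_digit_coords(x_start, y_start, coords_list):
--     """
--     ממיר קואורדינטות אבסולוטיות לפורמט של DIGIT_MAPS
--
--     Args:
--         x_start: X של הפינה השמאלית העליונה של הספרה
--         y_start: Y של הפינה השמאלית העליונה של הספרה
--         coords_list: רשימת קואורדינטות (x, y) של כל הפיקסלים שצהובים (חלק מהספרה)
--
--     Returns:
--         רשימה בפורמט DIGIT_MAPS: [(row_idx, [cols]), ...]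
--     """
--     # יצירת מילון: row -> set של cols
--     digit_map = {}
--
--     for x, y in coords_list:
--         # המרה ליחסי
--         rel_x = x - x_start
--         rel_y = y - y_start
--
--         # בדיקת גבולות (0-9 ל-X, 0-14 ל-Y)
--         if 0 <= rel_x < 10 and 0 <= rel_y < 15:
--             if rel_y not in digit_map:
--                 digit_map[rel_y] = set()
--             digit_map[rel_y].add(rel_x)
--
--     # המרה לפורמט של DIGIT_MAPS
--     result = []
--     for row in range(15):
--         cols = sorted(digit_map.get(row, []))
--         result.append((row, cols))
--
--     return result
-- ===== SOURCE B (Python) =====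
-- def parse_digit_coords(x_start, y_start, coords_list):
--     return [(row, sorted({x - x_start for (x, y) in coords_list
--                           if y - y_start == row and 0 <= x - x_start < 10}))
--             for row in range(15)]
-- ===== Notes on version B (the rewrite author's own statement) =====
-- stated objective: simpler
-- what changed: Replaces the single-pass dict-of-sets index build plus a separate emission loop by one 15-row comprehension that re-scans coords_list per row, gathering that row's columns with a set comprehension and sorting.
import Mathlib
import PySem

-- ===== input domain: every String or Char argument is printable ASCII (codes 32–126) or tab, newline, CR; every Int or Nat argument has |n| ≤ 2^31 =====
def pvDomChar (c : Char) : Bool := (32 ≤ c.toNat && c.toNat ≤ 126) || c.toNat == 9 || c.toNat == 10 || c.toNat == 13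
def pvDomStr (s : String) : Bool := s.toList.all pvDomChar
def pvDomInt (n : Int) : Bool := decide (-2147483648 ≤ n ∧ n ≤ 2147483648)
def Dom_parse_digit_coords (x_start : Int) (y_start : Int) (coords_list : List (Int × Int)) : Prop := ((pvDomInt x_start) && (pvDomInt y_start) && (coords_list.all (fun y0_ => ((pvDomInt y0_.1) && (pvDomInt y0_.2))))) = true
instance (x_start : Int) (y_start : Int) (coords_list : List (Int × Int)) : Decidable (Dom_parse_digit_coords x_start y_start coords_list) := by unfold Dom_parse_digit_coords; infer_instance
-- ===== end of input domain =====

-- B replaces A's single-pass dict-of-sets index build by a per-row comprehension that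
-- re-scans the coordinate list for each of the 15 rows (objective: simpler).

-- ===== PORT A =====
-- literal port of A: one pass bucketing pixels into a dict row -> set of cols, then emit rows 0..14
def parse_digit_coords (x_start : Int) (y_start : Int) (coords_list : List (Int × Int)) : List (Int × List Int) :=
  let digit_map : PySem.Dict Int (PySem.Set Int) :=
    coords_list.foldl (fun d p =>
      let rel_x := p.1 - x_start
      let rel_y := p.2 - y_start
      if 0 ≤ rel_x ∧ rel_x < 10 ∧ 0 ≤ rel_y ∧ rel_y < 15 then
        let d2 := if d.contains rel_y then d else d.insert rel_y PySem.Set.empty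
        d2.insert rel_y (PySem.Set.add (d2.getD rel_y PySem.Set.empty) rel_x)
      else d) PySem.Dict.empty
  (PySem.List.pyRange 0 15 1).foldl (fun res row =>
    res ++ [(row, PySem.List.sorted (digit_map.getD row PySem.Set.empty) (fun c => c) false)]) []

-- ===== PORT B =====
-- literal port of B: for each row 0..14, scan coords_list, collect that row's in-bounds cols as a set, sort
def parse_digit_coords_alt (x_start : Int) (y_start : Int) (coords_list : List (Int × Int)) : List (Int × List Int) :=
  (PySem.List.pyRange 0 15 1).map (fun row =>
    (row, PySem.List.sorted
      (PySem.Set.ofList ((coords_list.filter (fun p =>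
        decide (p.2 - y_start = row ∧ 0 ≤ p.1 - x_start ∧ p.1 - x_start < 10))).map
        (fun p => p.1 - x_start)))
      (fun c => c) false))

-- ===== PRECONDITION & SPEC =====
def Spec_parse_digit_coords (x_start : Int) (y_start : Int) (coords_list : List (Int × Int)) (out : List (Int × List Int)) : Prop := out = parse_digit_coords_alt x_start y_start coords_list
instance (x_start : Int) (y_start : Int) (coords_list : List (Int × Int)) (out : List (Int × List Int)) : Decidable (Spec_parse_digit_coords x_start y_start coords_list out) := by unfold Spec_parse_digit_coords; infer_instance

-- ===== CLAIM (what is proved, stated in full; the proofs are below) =====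
def Claim_equal_parse_digit_coords : Prop := ∀ (x_start : Int) (y_start : Int) (coords_list : List (Int × Int)), Dom_parse_digit_coords x_start y_start coords_list → Spec_parse_digit_coords x_start y_start coords_list (parse_digit_coords x_start y_start coords_list)

-- ===== LEMMAS AND PROOFS =====

-- one step of A's bucketing loop, observed through getD at row r
lemma step_getD (xs ys : Int) (p : Int × Int) (d : PySem.Dict Int (PySem.Set Int)) (r : Int) :
    (if 0 ≤ p.1 - xs ∧ p.1 - xs < 10 ∧ 0 ≤ p.2 - ys ∧ p.2 - ys < 15 then
        (if d.contains (p.2 - ys) then d else d.insert (p.2 - ys) PySem.Set.empty).insert (p.2 - ys)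
          (PySem.Set.add ((if d.contains (p.2 - ys) then d else d.insert (p.2 - ys) PySem.Set.empty).getD (p.2 - ys) PySem.Set.empty) (p.1 - xs))
      else d).getD r PySem.Set.empty =
    if p.2 - ys = r ∧ 0 ≤ p.1 - xs ∧ p.1 - xs < 10 ∧ 0 ≤ p.2 - ys ∧ p.2 - ys < 15 then
      PySem.Set.add (d.getD r PySem.Set.empty) (p.1 - xs)
    else d.getD r PySem.Set.empty := by
  by_cases hmem : d.contains (p.2 - ys) = true
  · simp only [hmem, if_true]
    split_ifs with h1 h2 h2
    · rw [PySem.Dict.getD_insert, if_pos h2.1.symm, h2.1]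
    · have hy : ¬(r = p.2 - ys) := fun h => h2 ⟨h.symm, h1⟩
      rw [PySem.Dict.getD_insert, if_neg hy]
    · exact absurd h2.2 h1
    · rfl
  · have hm : d.contains (p.2 - ys) = false := by simpa using hmem
    simp only [hm, Bool.false_eq_true, if_false]
    split_ifs with h1 h2 h2
    · rw [PySem.Dict.getD_insert, if_pos h2.1.symm, PySem.Dict.getD_insert, if_pos rfl,
        ← h2.1, PySem.Dict.getD_of_not_contains _ _ hm]
    · have hy : ¬(r = p.2 - ys) := fun h => h2 ⟨h.symm, h1⟩
      rw [PySem.Dict.getD_insert, if_neg hy, PySem.Dict.getD_insert, if_neg hy]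
    · exact absurd h2.2 h1
    · rfl

-- A's bucketing loop, observed at one row r (0 ≤ r < 15): it folds Set.add over exactly
-- the columns B's per-row filter selects.
lemma dict_fold_getD (xs ys : Int) (cs : List (Int × Int))
    (d : PySem.Dict Int (PySem.Set Int)) (r : Int) (hr0 : 0 ≤ r) (hr1 : r < 15) :
    (cs.foldl (fun d p =>
      let rel_x := p.1 - xs
      let rel_y := p.2 - ys
      if 0 ≤ rel_x ∧ rel_x < 10 ∧ 0 ≤ rel_y ∧ rel_y < 15 then
        let d2 := if d.contains rel_y then d else d.insert rel_y PySem.Set.empty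
        d2.insert rel_y (PySem.Set.add (d2.getD rel_y PySem.Set.empty) rel_x)
      else d) d).getD r PySem.Set.empty =
    ((cs.filter (fun p => decide (p.2 - ys = r ∧ 0 ≤ p.1 - xs ∧ p.1 - xs < 10))).map
      (fun p => p.1 - xs)).foldl PySem.Set.add (d.getD r PySem.Set.empty) := by
  induction cs generalizing d with
  | nil => rfl
  | cons p t ih =>
    simp only [List.foldl_cons]
    rw [ih, step_getD]
    by_cases hd : p.2 - ys = r ∧ 0 ≤ p.1 - xs ∧ p.1 - xs < 10
    · rw [List.filter_cons_of_pos (by simpa using hd), List.map_cons, List.foldl_cons,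
        if_pos ⟨hd.1, hd.2.1, hd.2.2, hd.1 ▸ hr0, hd.1 ▸ hr1⟩]
    · rw [List.filter_cons_of_neg (by simpa using hd),
        if_neg (fun h => hd ⟨h.1, h.2.1, h.2.2.1⟩)]

theorem parse_digit_coords_spec : Claim_equal_parse_digit_coords := by
  intro xs ys cs _
  unfold Spec_parse_digit_coords parse_digit_coords parse_digit_coords_alt
  rw [PySem.List.foldl_append_singleton_eq_map]
  simp only [List.nil_append]
  apply List.map_congr_left
  intro r hr
  have hb := PySem.List.mem_pyRange_one.mp hr
  rw [dict_fold_getD xs ys cs PySem.Dict.empty r hb.1 hb.2]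
  rw [PySem.Dict.getD_empty, PySem.Set.ofList_eq_foldl]
  rfl
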